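-- pv_equiv track=rewrite | github.com/storyinstoryjks/Algorithm | 프로그래머스/2/389480. 완전범죄/완전범죄.py | solution
-- ===== SOURCE A (Python) =====
-- import heapq
--
-- def solution(info, n, m):
--     # b를 최대한 많이 먹으면서, 큰 a를 제거하는 방향
--     answer,min_heap = 0,[]
--     prioritys={(3, 1): 0, (2, 1): 1, (3, 2): 2, (3, 3): 3, (2, 2): 4, (1, 1): 5, (2, 3): 6, (1, 2): 7, (1, 3): 8}
--
--     for a,b in info:
--         heapq.heappush(min_heap,(prioritys[(a,b)],a,b))
--
--     cur_m=0
--     while min_heap: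
--         p,a,b=heapq.heappop(min_heap)
--         t=cur_m+b
--         if t<m:
--             cur_m=t
--             continue
--         answer+=abs(a)
--
--     return answer if answer<n else -1
-- ===== SOURCE B (Python) =====
-- PRIORITY = {(3, 1): 0, (2, 1): 1, (3, 2): 2, (3, 3): 3, (2, 2): 4,
--             (1, 1): 5, (2, 3): 6, (1, 2): 7, (1, 3): 8}
--
--
-- def solution(info, n, m):
--     # Process the nine priority classes in ascending order; within a class all
--     # pairs are identical, so a plain pass over info per class reproduces the
--     # heap's pop order without any heap.
--     answer = 0
--     cur_m = 0
--     for p in range(9):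
--         for a, b in info:
--             if PRIORITY[(a, b)] != p:
--                 continue
--             if cur_m + b < m:
--                 cur_m += b
--             else:
--                 answer += abs(a)
--     return answer if answer < n else -1
-- ===== Notes on version B (the rewrite author's own statement) =====
-- stated objective: simpler
-- what changed: Replaces the heap (push all (priority,a,b) triples, pop-min loop) by nine plain passes over info, one per priority class 0..8 in ascending order, applying the same greedy update; no heap, no triple list.
import Mathlib
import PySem

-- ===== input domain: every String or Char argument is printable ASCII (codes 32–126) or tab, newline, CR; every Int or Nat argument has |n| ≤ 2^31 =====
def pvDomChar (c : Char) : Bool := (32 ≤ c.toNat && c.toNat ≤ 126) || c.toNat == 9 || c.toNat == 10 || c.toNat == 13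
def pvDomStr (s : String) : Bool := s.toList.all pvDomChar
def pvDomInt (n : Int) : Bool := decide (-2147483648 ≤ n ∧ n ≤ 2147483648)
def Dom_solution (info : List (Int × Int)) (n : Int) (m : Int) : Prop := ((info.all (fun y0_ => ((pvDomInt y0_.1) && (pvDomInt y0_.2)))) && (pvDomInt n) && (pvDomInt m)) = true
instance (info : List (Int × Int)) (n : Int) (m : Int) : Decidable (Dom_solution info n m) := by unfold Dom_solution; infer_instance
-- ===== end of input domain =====

-- B replaces A's heap by nine plain passes over info, one per priority class 0..8
-- in ascending order, with the same greedy update (objective: simpler).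

-- ===== PORT A =====
-- the `prioritys` dict literal
def pvPrioritysA : PySem.Dict (Int × Int) Int :=
  PySem.Dict.ofList [((3,1),0), ((2,1),1), ((3,2),2), ((3,3),3), ((2,2),4), ((1,1),5), ((2,3),6), ((1,2),7), ((1,3),8)]

-- `prioritys[(a,b)]`; a pair outside the table is a KeyError in A, excluded by Pre_solution
-- (the `.getD 0` is a placeholder never reached inside Pre_solution)
def pvPrioA (ab : Int × Int) : Int := (PySem.Dict.get? pvPrioritysA ab).getD 0

-- Python tuple `<` on the heap's (priority, a, b) triples (lexicographic)
def pvTripLt (x y : Int × Int × Int) : Bool :=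
  decide (x.1 < y.1) ||
    (decide (x.1 = y.1) &&
      (decide (x.2.1 < y.2.1) || (decide (x.2.1 = y.2.1) && decide (x.2.2 < y.2.2))))

-- the minimum of the heap contents: what `heapq.heappop` returns (ties are identical triples)
def pvFindMin (x : Int × Int × Int) (xs : List (Int × Int × Int)) : Int × Int × Int :=
  xs.foldl (fun acc z => if pvTripLt z acc then z else acc) x

-- needed for termination of the pop loop
theorem pvFindMin_mem : ∀ (xs : List (Int × Int × Int)) (x), pvFindMin x xs ∈ x :: xs
  | [], _ => by simp [pvFindMin]
  | z :: xs, x => by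
    have h := pvFindMin_mem xs (if pvTripLt z x then z else x)
    simp only [pvFindMin, List.foldl_cons] at h ⊢
    rcases List.mem_cons.1 h with h | h
    · rw [h]; split <;> simp
    · simp [h]

-- the `while min_heap:` loop; the heap is modelled by its contents, pop takes the minimum
def pvHeapLoop (heap : List (Int × Int × Int)) (answer cur_m m : Int) : Int :=
  match heap with
  | [] => answer
  | x :: xs =>
    if cur_m + (pvFindMin x xs).2.2 < m then
      pvHeapLoop ((x :: xs).erase (pvFindMin x xs)) answer (cur_m + (pvFindMin x xs).2.2) m
    else
      pvHeapLoop ((x :: xs).erase (pvFindMin x xs)) (answer + |(pvFindMin x xs).2.1|) cur_m m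
termination_by heap.length
decreasing_by
  all_goals simp [List.length_erase_of_mem (pvFindMin_mem xs x)]

def solution (info : List (Int × Int)) (n : Int) (m : Int) : Int :=
  let heap := info.foldl (fun h ab => h ++ [(pvPrioA ab, ab.1, ab.2)]) []
  let answer := pvHeapLoop heap 0 0 m
  if answer < n then answer else -1

-- ===== PORT B =====
-- the `PRIORITY` dict literal
def pvPriorityB : PySem.Dict (Int × Int) Int :=
  PySem.Dict.ofList [((3,1),0), ((2,1),1), ((3,2),2), ((3,3),3), ((2,2),4), ((1,1),5), ((2,3),6), ((1,2),7), ((1,3),8)]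

def pvPrioB (ab : Int × Int) : Int := (PySem.Dict.get? pvPriorityB ab).getD 0

-- body of B's inner loop on the state (answer, cur_m)
def pvStep (m : Int) (st : Int × Int) (ab : Int × Int) : Int × Int :=
  if st.2 + ab.2 < m then (st.1, st.2 + ab.2) else (st.1 + |ab.1|, st.2)

def solution_alt (info : List (Int × Int)) (n : Int) (m : Int) : Int :=
  let st := (PySem.List.pyRange 0 9 1).foldl
    (fun st p => info.foldl (fun st ab => if pvPrioB ab ≠ p then st else pvStep m st ab) st)
    ((0 : Int), (0 : Int))
  if st.1 < n then st.1 else -1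

-- ===== PRECONDITION & SPEC =====
def pvKeys : List (Int × Int) :=
  [(3,1), (2,1), (3,2), (3,3), (2,2), (1,1), (2,3), (1,2), (1,3)]

-- exactly the inputs where A returns: any pair outside the 9-key table is a KeyError in A
def Pre_solution (info : List (Int × Int)) (n : Int) (m : Int) : Prop :=
  ∀ ab ∈ info, ab ∈ pvKeys
instance (info : List (Int × Int)) (n : Int) (m : Int) : Decidable (Pre_solution info n m) := by
  unfold Pre_solution; infer_instance

def pvWitness_solution : (List (Int × Int)) × Int × Int := ([(1,2), (3,1), (1,2), (2,3)], 2, 3)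

def Spec_solution (info : List (Int × Int)) (n : Int) (m : Int) (out : Int) : Prop := out = solution_alt info n m
instance (info : List (Int × Int)) (n : Int) (m : Int) (out : Int) : Decidable (Spec_solution info n m out) := by unfold Spec_solution; infer_instance

-- ===== CLAIM (what is proved, stated in full; the proofs are below) =====
def Claim_equal_solution : Prop := ∀ (info : List (Int × Int)) (n : Int) (m : Int), Dom_solution info n m → Pre_solution info n m → Spec_solution info n m (solution info n m)

-- ===== LEMMAS AND PROOFS =====

-- strict-order facts about pvTripLt
theorem pvLt_irrefl (x : Int × Int × Int) : pvTripLt x x = false := by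
  simp [pvTripLt]

theorem pvLt_antisymm (x y : Int × Int × Int) :
    pvTripLt x y = false → pvTripLt y x = false → x = y := by
  obtain ⟨x1, x2, x3⟩ := x; obtain ⟨y1, y2, y3⟩ := y
  simp [pvTripLt, Prod.ext_iff]; omega

theorem pvLt_trans (x y z : Int × Int × Int) :
    pvTripLt x y = true → pvTripLt y z = true → pvTripLt x z = true := by
  obtain ⟨x1, x2, x3⟩ := x; obtain ⟨y1, y2, y3⟩ := y; obtain ⟨z1, z2, z3⟩ := z
  simp [pvTripLt]; omega

theorem pvLt_of_le_of_lt (x z y : Int × Int × Int) :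
    pvTripLt z x = false → pvTripLt z y = true → pvTripLt x y = true := by
  obtain ⟨x1, x2, x3⟩ := x; obtain ⟨y1, y2, y3⟩ := y; obtain ⟨z1, z2, z3⟩ := z
  simp [pvTripLt]; omega

theorem pvFindMin_cons (x z : Int × Int × Int) (xs : List (Int × Int × Int)) :
    pvFindMin x (z :: xs) = pvFindMin (if pvTripLt z x then z else x) xs := rfl

-- pvFindMin is minimal among the heap contents
theorem pvFindMin_min : ∀ (xs : List (Int × Int × Int)) (x y), y ∈ x :: xs →
    pvTripLt y (pvFindMin x xs) = false
  | [], x, y, hy => by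
    simp at hy; subst hy; simpa [pvFindMin] using pvLt_irrefl y
  | z :: xs, x, y, hy => by
    rw [pvFindMin_cons]
    by_cases hzx : pvTripLt z x = true
    · rw [if_pos hzx]
      rcases List.mem_cons.1 hy with rfl | hy'
      · cases hlt : pvTripLt y (pvFindMin z xs) with
        | false => rfl
        | true =>
          have hz := pvFindMin_min xs z z List.mem_cons_self
          have := pvLt_trans z y (pvFindMin z xs) hzx hlt
          exact absurd this (by simp [hz])
      · exact pvFindMin_min xs z y hy'
    · rw [if_neg hzx]
      have hzx' : pvTripLt z x = false := by simpa using hzx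
      rcases List.mem_cons.1 hy with rfl | hy'
      · exact pvFindMin_min xs _ _ List.mem_cons_self
      · rcases List.mem_cons.1 hy' with rfl | hy''
        · cases hlt : pvTripLt y (pvFindMin x xs) with
          | false => rfl
          | true =>
            have hx := pvFindMin_min xs x x List.mem_cons_self
            have := pvLt_of_le_of_lt x y (pvFindMin x xs) hzx' hlt
            exact absurd this (by simp [hx])
        · exact pvFindMin_min xs x y (List.mem_cons_of_mem _ hy'')

-- the sequence of values popped from the heap
def pvPopAll (L : List (Int × Int × Int)) : List (Int × Int × Int) :=
  match L with
  | [] => []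
  | x :: xs => pvFindMin x xs :: pvPopAll ((x :: xs).erase (pvFindMin x xs))
termination_by L.length
decreasing_by
  all_goals simp [List.length_erase_of_mem (pvFindMin_mem xs x)]

theorem pvPopAll_perm : ∀ (L : List (Int × Int × Int)), List.Perm (pvPopAll L) L := by
  intro L
  induction L using pvPopAll.induct with
  | case1 => simp [pvPopAll]
  | case2 x xs ih =>
    rw [pvPopAll]
    exact (ih.cons _).trans (List.perm_cons_erase (pvFindMin_mem xs x)).symm

theorem pvPopAll_sorted : ∀ (L : List (Int × Int × Int)),
    List.Pairwise (fun a b => pvTripLt b a = false) (pvPopAll L) := by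
  intro L
  induction L using pvPopAll.induct with
  | case1 => simp [pvPopAll]
  | case2 x xs ih =>
    rw [pvPopAll]
    refine List.Pairwise.cons ?_ ih
    intro y hy
    have hy' : y ∈ (x :: xs).erase (pvFindMin x xs) := (pvPopAll_perm _).subset hy
    exact pvFindMin_min xs x y (List.mem_of_mem_erase hy')

-- the greedy pass over an explicit list of triples
def pvGreedy (L : List (Int × Int × Int)) (answer cur_m m : Int) : Int :=
  match L with
  | [] => answer
  | t :: ts =>
    if cur_m + t.2.2 < m then pvGreedy ts answer (cur_m + t.2.2) m
    else pvGreedy ts (answer + |t.2.1|) cur_m m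

theorem pvHeapLoop_eq_greedy : ∀ (L : List (Int × Int × Int)) (a c m : Int),
    pvHeapLoop L a c m = pvGreedy (pvPopAll L) a c m := by
  intro L a c m
  induction L, a, c using pvHeapLoop.induct m with
  | case1 a _ => simp [pvHeapLoop, pvPopAll, pvGreedy]
  | case2 x xs a c h ih => rw [pvHeapLoop, pvPopAll, pvGreedy]; simp [h, ih]
  | case3 x xs a c h ih => rw [pvHeapLoop, pvPopAll, pvGreedy]; simp [h, ih]

-- the list of pushed triples
def pvTr (ab : Int × Int) : Int × Int × Int := (pvPrioA ab, ab.1, ab.2)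

theorem pvBuild : ∀ (info : List (Int × Int)) (acc : List (Int × Int × Int)),
    info.foldl (fun h ab => h ++ [(pvPrioA ab, ab.1, ab.2)]) acc = acc ++ info.map pvTr
  | [], acc => by simp
  | ab :: info, acc => by simp [pvBuild info, pvTr]

-- triple-state version of B's step
def pvStepT (m : Int) (st : Int × Int) (t : Int × Int × Int) : Int × Int :=
  if st.2 + t.2.2 < m then (st.1, st.2 + t.2.2) else (st.1 + |t.2.1|, st.2)

theorem pvGreedy_foldl : ∀ (L : List (Int × Int × Int)) (a c m : Int),
    pvGreedy L a c m = (L.foldl (pvStepT m) (a, c)).1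
  | [], _, _, _ => by simp [pvGreedy]
  | t :: ts, a, c, m => by
    rw [pvGreedy, List.foldl_cons]
    by_cases h : c + t.2.2 < m
    · rw [if_pos h, pvGreedy_foldl ts]
      simp [pvStepT, h]
    · rw [if_neg h, pvGreedy_foldl ts]
      simp [pvStepT, h]

-- B's processing sequence: the buckets, ascending priority
def pvSeq (info : List (Int × Int)) : List (Int × Int × Int) :=
  (PySem.List.pyRange 0 9 1).flatMap (fun p => (info.map pvTr).filter (fun t => t.1 = p))

theorem pvRange9 : PySem.List.pyRange 0 9 1 = [0, 1, 2, 3, 4, 5, 6, 7, 8] := by decide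

theorem pvKeys_elim (ab : Int × Int) (h : ab ∈ pvKeys) :
    ab = (3,1) ∨ ab = (2,1) ∨ ab = (3,2) ∨ ab = (3,3) ∨ ab = (2,2) ∨ ab = (1,1) ∨
      ab = (2,3) ∨ ab = (1,2) ∨ ab = (1,3) := by
  simpa [pvKeys, List.mem_cons] using h

theorem pvPrio_mem_range (ab : Int × Int) (h : ab ∈ pvKeys) :
    pvPrioA ab ∈ ([0,1,2,3,4,5,6,7,8] : List Int) := by
  rcases pvKeys_elim ab h with rfl|rfl|rfl|rfl|rfl|rfl|rfl|rfl|rfl <;> decide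

theorem pvPrio_inj (ab ab' : Int × Int) (h : ab ∈ pvKeys) (h' : ab' ∈ pvKeys)
    (he : pvPrioA ab = pvPrioA ab') : ab = ab' := by
  rcases pvKeys_elim ab h with rfl|rfl|rfl|rfl|rfl|rfl|rfl|rfl|rfl <;>
    rcases pvKeys_elim ab' h' with rfl|rfl|rfl|rfl|rfl|rfl|rfl|rfl|rfl <;>
      first | rfl | (exfalso; revert he; decide)

-- generic: bucketing by first component is a permutation
theorem pvFlatMapCons (x : Int × Int × Int) (L : List (Int × Int × Int)) :
    ∀ (ps : List Int), x.1 ∈ ps → ps.Nodup →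
    List.Perm (ps.flatMap fun p => (x :: L).filter fun t => decide (t.1 = p))
      (x :: (ps.flatMap fun p => L.filter fun t => decide (t.1 = p)))
  | [], hx, _ => by simp at hx
  | p :: ps, hx, hnd => by
    have hnd' := (List.nodup_cons.1 hnd).2
    have hpn := (List.nodup_cons.1 hnd).1
    rw [List.flatMap_cons, List.flatMap_cons]
    by_cases hp : x.1 = p
    · rw [List.filter_cons_of_pos (by simp [hp])]
      have hrest : (ps.flatMap fun q => (x :: L).filter fun t => decide (t.1 = q)) =
          ps.flatMap fun q => L.filter fun t => decide (t.1 = q) := by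
        apply List.flatMap_congr
        intro q hq
        rw [List.filter_cons_of_neg (by
          simp only [decide_eq_true_eq]
          intro h
          exact hpn ((hp.symm.trans h).symm ▸ hq))]
      rw [hrest]
      simp
    · rw [List.filter_cons_of_neg (by simp [hp])]
      have hx' : x.1 ∈ ps := by
        rcases List.mem_cons.1 hx with h | h
        · exact absurd h hp
        · exact h
      exact (List.Perm.append_left _ (pvFlatMapCons x L ps hx' hnd')).trans List.perm_middle

theorem pvFlatMapPerm : ∀ (L : List (Int × Int × Int)) (ps : List Int), ps.Nodup →
    (∀ t ∈ L, t.1 ∈ ps) →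
    List.Perm (ps.flatMap fun p => L.filter fun t => decide (t.1 = p)) L
  | [], ps, _, _ => by simp
  | x :: L, ps, hnd, hmem => by
    have h1 := pvFlatMapCons x L ps (hmem x List.mem_cons_self) hnd
    have h2 := pvFlatMapPerm L ps hnd (fun t ht => hmem t (List.mem_cons_of_mem _ ht))
    exact h1.trans (h2.cons x)

theorem pvSeq_perm (info : List (Int × Int)) (hpre : ∀ ab ∈ info, ab ∈ pvKeys) :
    List.Perm (pvSeq info) (info.map pvTr) := by
  rw [pvSeq, pvRange9]
  apply pvFlatMapPerm
  · decide
  · intro t ht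
    rcases List.mem_map.1 ht with ⟨ab, hab, rfl⟩
    exact pvPrio_mem_range ab (hpre ab hab)

theorem pvSeq_sorted (info : List (Int × Int)) (hpre : ∀ ab ∈ info, ab ∈ pvKeys) :
    List.Pairwise (fun a b => pvTripLt b a = false) (pvSeq info) := by
  rw [pvSeq, List.pairwise_flatMap]
  constructor
  · -- within a bucket: all triples are equal, the relation holds reflexively there
    intro p _
    apply List.pairwise_of_forall_mem_list
    intro a ha b hb
    rcases List.mem_filter.1 ha with ⟨ha', hap⟩
    rcases List.mem_filter.1 hb with ⟨hb', hbp⟩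
    rcases List.mem_map.1 ha' with ⟨ab, hab, rfl⟩
    rcases List.mem_map.1 hb' with ⟨ab', hab', rfl⟩
    simp only [decide_eq_true_eq] at hap hbp
    have : ab = ab' := pvPrio_inj ab ab' (hpre ab hab) (hpre ab' hab')
      (by simpa [pvTr] using hap.trans hbp.symm)
    subst this
    exact pvLt_irrefl _
  · -- across buckets: ascending priority forces the relation
    have hlt : List.Pairwise (fun p q : Int => p < q) (PySem.List.pyRange 0 9 1) := by
      rw [pvRange9]; decide
    refine hlt.imp ?_
    intro p q hpq a ha b hb
    rcases List.mem_filter.1 ha with ⟨_, hap⟩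
    rcases List.mem_filter.1 hb with ⟨_, hbp⟩
    simp only [decide_eq_true_eq] at hap hbp
    obtain ⟨a1, a2, a3⟩ := a; obtain ⟨b1, b2, b3⟩ := b
    simp only at hap hbp
    subst hap; subst hbp
    simp [pvTripLt]; omega

theorem pvPopAll_eq_seq (info : List (Int × Int)) (hpre : ∀ ab ∈ info, ab ∈ pvKeys) :
    pvPopAll (info.map pvTr) = pvSeq info := by
  apply List.Perm.eq_of_pairwise (le := fun a b => pvTripLt b a = false)
  · intro a b _ _ h1 h2
    exact pvLt_antisymm a b h2 h1
  · exact pvPopAll_sorted _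
  · exact pvSeq_sorted info hpre
  · exact (pvPopAll_perm _).trans (pvSeq_perm info hpre).symm

theorem pvPrioB_eq_A : pvPrioB = pvPrioA := rfl

-- B's nested fold equals the fold of pvStepT over pvSeq
theorem pvAlt_fold (info : List (Int × Int)) (m : Int) :
    ((PySem.List.pyRange 0 9 1).foldl
      (fun st p => info.foldl (fun st ab => if pvPrioB ab ≠ p then st else pvStep m st ab) st)
      ((0 : Int), (0 : Int))) = (pvSeq info).foldl (pvStepT m) ((0 : Int), (0 : Int)) := by
  rw [pvSeq, List.foldl_flatMap]
  congr 1
  funext st p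
  rw [List.filter_map, List.foldl_map, List.foldl_filter]
  congr 1
  funext st' ab
  by_cases h : pvPrioA ab = p
  · simp [h, Function.comp, pvTr, pvPrioB_eq_A, pvStepT, pvStep]
  · simp [h, Function.comp, pvTr, pvPrioB_eq_A]

-- ===== VERDICT (by name: the statement is the Claim_ definition above) =====
theorem solution_spec : Claim_equal_solution := by
  intro info n m _ hpre
  unfold Spec_solution
  simp only [solution, solution_alt]
  rw [pvBuild info [], List.nil_append, pvHeapLoop_eq_greedy,
    pvPopAll_eq_seq info hpre, pvGreedy_foldl, ← pvAlt_fold]
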